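-- pv_equiv track=rewrite | github.com/moonyeol/algorithm | python/한이음ict코테-1.py | solution
-- ===== SOURCE A (Python) =====
-- def solution(goods):
--     tmp =0
--     sum = 0
--     for i in goods:
--         if i>=50 :
--             i = i-10
--             sum += i
--         else:
--             tmp += i
--     if tmp>=50:
--         tmp -=10
--         sum += tmp
--     else:
--         sum += tmp
--     return sum
-- ===== SOURCE B (Python) =====
-- def solution(goods):
--     s = sorted(goods)
--     # binary search: first index whose element is >= 50
--     lo, hi = 0, len(s)
--     while lo < hi:
--         mid = (lo + hi) // 2
--         if s[mid] < 50:
--             lo = mid + 1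
--         else:
--             hi = mid
--     small = sum(s[:lo])
--     big = sum(s[lo:])
--     return big - 10 * (len(s) - lo) + small - (10 if small >= 50 else 0)
-- ===== Notes on version B (the rewrite author's own statement) =====
-- stated objective: alternative
-- what changed: B sorts the list, binary-searches the boundary of the >=50 items, and computes the answer from the sums of the two slices, instead of A's single fused loop with a running discounted sum and a small pool.
import Mathlib
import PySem

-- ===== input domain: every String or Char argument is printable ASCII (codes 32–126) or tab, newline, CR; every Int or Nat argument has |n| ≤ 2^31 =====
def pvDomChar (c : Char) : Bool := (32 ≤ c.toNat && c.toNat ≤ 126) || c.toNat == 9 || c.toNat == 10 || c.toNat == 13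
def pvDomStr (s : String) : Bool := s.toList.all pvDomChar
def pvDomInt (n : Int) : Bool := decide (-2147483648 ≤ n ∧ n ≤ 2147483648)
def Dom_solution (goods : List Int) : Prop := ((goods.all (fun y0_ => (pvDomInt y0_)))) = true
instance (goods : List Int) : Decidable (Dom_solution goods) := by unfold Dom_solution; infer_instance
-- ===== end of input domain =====

-- One honest line: B sorts the list, binary-searches the >=50 boundary and sums the two slices,
-- instead of A's fused loop with a running discounted sum and a small pool (alternative decomposition).

-- ===== PORT A =====
def solution (goods : List Int) : Int :=
  let st := goods.foldl (fun (p : Int × Int) i =>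
    if i ≥ 50 then (p.1, p.2 + (i - 10)) else (p.1 + i, p.2)) (0, 0)
  if st.1 ≥ 50 then st.2 + (st.1 - 10) else st.2 + st.1

-- ===== PORT B =====
-- the while-loop binary search of Source B; lo and hi are list indices, always 0 ≤ lo ≤ hi ≤ len,
-- so s[mid] is always in range and getD's default is never used
def pvBsearch (s : List Int) (lo hi : Nat) : Nat :=
  if lo < hi then
    let mid := (lo + hi) / 2
    if s.getD mid 0 < 50 then pvBsearch s (mid + 1) hi else pvBsearch s lo mid
  else lo
termination_by hi - lo
decreasing_by all_goals omega

def solution_alt (goods : List Int) : Int :=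
  let s := PySem.List.sorted goods (fun x => x) false
  let lo := pvBsearch s 0 s.length
  let small := (PySem.List.slice s none (some (lo : Int))).sum
  let big := (PySem.List.slice s (some (lo : Int)) none).sum
  big - 10 * ((s.length : Int) - (lo : Int)) + small - (if small ≥ 50 then 10 else 0)

-- ===== PRECONDITION & SPEC =====
def Spec_solution (goods : List Int) (out : Int) : Prop := out = solution_alt goods
instance (goods : List Int) (out : Int) : Decidable (Spec_solution goods out) := by unfold Spec_solution; infer_instance

-- ===== CLAIM (what is proved, stated in full; the proofs are below) =====
def Claim_equal_solution : Prop := ∀ (goods : List Int), Dom_solution goods → Spec_solution goods (solution goods)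

-- ===== LEMMAS AND PROOFS =====

lemma pv_getD_mono (s : List Int) (hs : s.Pairwise (· ≤ ·)) {i j : Nat}
    (hij : i ≤ j) (hj : j < s.length) : s.getD i 0 ≤ s.getD j 0 := by
  rcases Nat.lt_or_ge i j with h | h
  · have := (List.pairwise_iff_getElem.mp hs) i j (by omega) hj h
    rwa [List.getD_eq_getElem s 0 (by omega), List.getD_eq_getElem s 0 hj]
  · have : i = j := by omega
    subst this; rfl

lemma pvBsearch_spec (s : List Int) (hs : s.Pairwise (· ≤ ·)) :
    ∀ n lo hi, hi - lo ≤ n → lo ≤ hi → hi ≤ s.length →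
    (∀ i, i < lo → s.getD i 0 < 50) →
    (∀ i, hi ≤ i → i < s.length → 50 ≤ s.getD i 0) →
    pvBsearch s lo hi ≤ s.length ∧
    (∀ i, i < pvBsearch s lo hi → s.getD i 0 < 50) ∧
    (∀ i, pvBsearch s lo hi ≤ i → i < s.length → 50 ≤ s.getD i 0) := by
  intro n
  induction n with
  | zero =>
    intro lo hi hn hle hhi hlow hhigh
    have : lo = hi := by omega
    subst this
    rw [pvBsearch]
    simp only [lt_irrefl, if_false]
    exact ⟨by omega, hlow, hhigh⟩
  | succ n ih =>
    intro lo hi hn hle hhi hlow hhigh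
    rw [pvBsearch]
    by_cases h : lo < hi
    · simp only [h, if_true]
      set mid := (lo + hi) / 2 with hmid
      have hmlo : lo ≤ mid := by omega
      have hmhi : mid < hi := by omega
      by_cases hv : s.getD mid 0 < 50
      · simp only [hv, if_true]
        refine ih (mid + 1) hi (by omega) (by omega) hhi ?_ hhigh
        intro i hi'
        exact lt_of_le_of_lt (pv_getD_mono s hs (by omega) (by omega)) hv
      · simp only [hv, if_false]
        refine ih lo mid (by omega) (by omega) (by omega) hlow ?_
        intro i hmi hilen
        have h50 : 50 ≤ s.getD mid 0 := by omega
        exact le_trans h50 (pv_getD_mono s hs hmi hilen)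
    · simp only [h, if_false]
      have : lo = hi := by omega
      subst this
      exact ⟨by omega, hlow, hhigh⟩

-- a list split at k with all-<50 before and all-≥50 after: take/drop ARE the two filters
lemma pv_split_filter (p : Int → Bool) :
    ∀ (s : List Int) (k : Nat), k ≤ s.length →
    (∀ i, i < k → p (s.getD i 0) = true) →
    (∀ i, k ≤ i → i < s.length → p (s.getD i 0) = false) →
    s.filter p = s.take k ∧ s.filter (fun x => !p x) = s.drop k := by
  intro s
  induction s with
  | nil => intro k hk _ _; simp at hk; subst hk; simp
  | cons x xs ihs =>
    intro k hk hlow hhigh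
    cases k with
    | zero =>
      have hx : p x = false := hhigh 0 (by omega) (by simp)
      have hxs : xs.filter p = [] := by
        rw [List.filter_eq_nil_iff]
        intro a ha
        obtain ⟨i, hi, hei⟩ := List.mem_iff_getElem.mp ha
        have := hhigh (i + 1) (by omega) (by simpa using hi)
        simp only [List.getD_cons_succ] at this
        rw [List.getD_eq_getElem xs 0 hi, hei] at this
        simp [this]
      have hxs2 : xs.filter (fun x => !p x) = xs := by
        rw [List.filter_eq_self]
        intro a ha
        obtain ⟨i, hi, hei⟩ := List.mem_iff_getElem.mp ha
        have := hhigh (i + 1) (by omega) (by simpa using hi)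
        simp only [List.getD_cons_succ] at this
        rw [List.getD_eq_getElem xs 0 hi, hei] at this
        simp [this]
      simp [hx, hxs, hxs2]
    | succ j =>
      have hx : p x = true := by simpa using hlow 0 (by omega)
      have ih := ihs j (by simpa using hk)
        (fun i hij => by simpa using hlow (i + 1) (by omega))
        (fun i hji hil => by simpa using hhigh (i + 1) (by omega) (by simpa using hil))
      simp [hx, ih.1, ih.2]

lemma pv_decide_flip : ∀ x : Int, (decide (x ≥ 50)) = (!decide (x < 50)) := by
  intro x; by_cases h : x < 50
  · simp [h]
  · simp [h]; omega

lemma pv_foldl_state (goods : List Int) (t s : Int) :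
    goods.foldl (fun (p : Int × Int) i =>
      if i ≥ 50 then (p.1, p.2 + (i - 10)) else (p.1 + i, p.2)) (t, s)
    = (t + (goods.filter (fun i => i < 50)).sum,
       s + (goods.filter (fun i => i ≥ 50)).sum
         - 10 * ((goods.filter (fun i => i ≥ 50)).length : Int)) := by
  induction goods generalizing t s with
  | nil => simp
  | cons x xs ih =>
    by_cases hx : x ≥ 50
    · have hx' : ¬ x < 50 := by omega
      simp [List.foldl, hx, hx', ih]; ring
    · have hx' : x < 50 := by omega
      simp [List.foldl, hx, hx', ih]; ring

-- ===== VERDICT (by name: the statement is the Claim_ definition above) =====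
theorem solution_spec : Claim_equal_solution := by
  intro goods _
  unfold Spec_solution
  show solution goods = solution_alt goods
  unfold solution solution_alt
  simp only []
  set s := PySem.List.sorted goods (fun x => x) false with hsdef
  have hperm : s.Perm goods := PySem.List.sorted_perm goods (fun x => x) false
  have hpw : s.Pairwise (· ≤ ·) := by
    simpa using PySem.List.sorted_pairwise goods (fun x => x)
  set k := pvBsearch s 0 s.length with hkdef
  have hspec := pvBsearch_spec s hpw s.length 0 s.length (by omega) (by omega) (le_refl _)
      (by omega) (by omega)
  rw [← hkdef] at hspec
  obtain ⟨hklen, hlow, hhigh⟩ := hspec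
  have hsplit := pv_split_filter (fun x => decide (x < 50)) s k hklen
      (fun i hik => by simpa using hlow i hik)
      (fun i hki hil => by simpa using hhigh i hki hil)
  -- slices are take/drop
  rw [PySem.List.slice_to_natCast, PySem.List.slice_from_natCast]
  -- B's slice sums in terms of filters of s
  rw [← hsplit.1, ← hsplit.2]
  -- transport filters of s to filters of goods
  have hflip : s.filter (fun x => !decide (x < 50)) = s.filter (fun i => decide (i ≥ 50)) :=
    List.filter_congr (fun x _ => (pv_decide_flip x).symm)
  rw [hflip]
  have hsum_small : (s.filter (fun i => decide (i < 50))).sum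
      = (goods.filter (fun i => decide (i < 50))).sum :=
    (hperm.filter _).sum_eq
  have hsum_big : (s.filter (fun i => decide (i ≥ 50))).sum
      = (goods.filter (fun i => decide (i ≥ 50))).sum :=
    (hperm.filter _).sum_eq
  have hlen_big : (s.filter (fun i => decide (i ≥ 50))).length
      = (goods.filter (fun i => decide (i ≥ 50))).length :=
    (hperm.filter _).length_eq
  -- len(s) - k = number of ≥50 items: s.length = small.length + big.length, small.length = k
  have hlen_small : (s.filter (fun i => decide (i < 50))).length = k := by
    rw [hsplit.1, List.length_take]; omega
  have hlen_split : s.length = (s.filter (fun i => decide (i < 50))).length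
      + (s.filter (fun x => !decide (x < 50))).length :=
    List.length_eq_length_filter_add (fun i => decide (i < 50))
  rw [hflip, hlen_small] at hlen_split
  rw [pv_foldl_state]
  simp only [zero_add]
  rw [hsum_small, hsum_big, hlen_big] at *
  have hlenk : ((s.length : Int) - (k : Int))
      = ((goods.filter (fun i => decide (i ≥ 50))).length : Int) := by
    rw [← hlen_big]; omega
  rw [hlenk]
  split_ifs with h1 <;> omega
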